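-- pv_equiv track=rewrite | github.com/DavidRichardGit/Presortedness-ML | SortsComparisonCount/IntrosortComp.py | introsort
-- ===== SOURCE A (Python) =====
-- import math
--
-- def introsort(arr):
--
--     def partition(arr, low, high):
--         pivot = arr[high]
--         i = low - 1
--         for j in range(low, high):
--             comparisons[0] += 1
--             if arr[j] <= pivot:
--                 i += 1
--                 arr[i], arr[j] = arr[j], arr[i]
--         arr[i + 1], arr[high] = arr[high], arr[i + 1]
--         return i + 1
--
--     def insertion_sort(arr, low, high):
--         for i in range(low + 1, high + 1):
--             key = arr[i]
--             j = i - 1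
--             comparisons[0] += 1
--             while j >= low and arr[j] > key:
--                 comparisons[0] += 1
--                 arr[j + 1] = arr[j]
--                 j -= 1
--             arr[j + 1] = key
--
--     def heap_sort(arr):
--         def heapify(arr, n, i):
--             largest = i
--             l = 2 * i + 1
--             r = 2 * i + 2
--
--             if l < n and arr[i] < arr[l]:
--                 largest = l
--
--             if r < n and arr[largest] < arr[r]:
--                 largest = r
--
--             if largest != i:
--                 arr[i], arr[largest] = arr[largest], arr[i]
--                 heapify(arr, n, largest)
--
--         n = len(arr)
--
--         for i in range(n // 2 - 1, -1, -1):
--             heapify(arr, n, i)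
--
--         for i in range(n - 1, 0, -1):
--             arr[i], arr[0] = arr[0], arr[i]
--             heapify(arr, i, 0)
--
--     def introsort_util(arr, low, high, depth_limit):
--         size = high - low + 1
--
--         if size < 16:
--             insertion_sort(arr, low, high)
--             return
--
--         if depth_limit == 0:
--             heap_sort(arr)
--             return
--
--         pivot = partition(arr, low, high)
--
--         introsort_util(arr, low, pivot - 1, depth_limit - 1)
--         introsort_util(arr, pivot + 1, high, depth_limit - 1)
--
--     comparisons = [0]
--     introsort_util(arr, 0, len(arr) - 1, 2 * math.log(len(arr)))
--     return comparisons[0]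
-- ===== SOURCE B (Python) =====
-- import math
--
--
-- def introsort(arr):
--     # Iterative driver: explicit stack of (low, high, depth_limit) frames replaces
--     # the recursion; insertion step finds the position first, then relocates the
--     # key with one del+insert instead of shifting while scanning.
--     # Mutates arr in place (sorts it), like the original.
--     comparisons = 0
--     stack = [(0, len(arr) - 1, 2 * math.log(len(arr)))]
--     while stack:
--         low, high, depth_limit = stack.pop()
--         size = high - low + 1
--         if size < 16:
--             for i in range(low + 1, high + 1):
--                 key = arr[i]
--                 j = i - 1
--                 comparisons += 1
--                 while j >= low and arr[j] > key:
--                     comparisons += 1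
--                     j -= 1
--                 del arr[i]
--                 arr.insert(j + 1, key)
--         elif depth_limit == 0:
--             _heap_sort(arr)
--         else:
--             pivot = arr[high]
--             i = low - 1
--             for j in range(low, high):
--                 comparisons += 1
--                 if arr[j] <= pivot:
--                     i += 1
--                     arr[i], arr[j] = arr[j], arr[i]
--             arr[i + 1], arr[high] = arr[high], arr[i + 1]
--             p = i + 1
--             stack.append((p + 1, high, depth_limit - 1))
--             stack.append((low, p - 1, depth_limit - 1))
--     return comparisons
--
--
-- def _heap_sort(arr):
--     def heapify(arr, n, i):
--         largest = i
--         l = 2 * i + 1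
--         r = 2 * i + 2
--         if l < n and arr[i] < arr[l]:
--             largest = l
--         if r < n and arr[largest] < arr[r]:
--             largest = r
--         if largest != i:
--             arr[i], arr[largest] = arr[largest], arr[i]
--             heapify(arr, n, largest)
--
--     n = len(arr)
--     for i in range(n // 2 - 1, -1, -1):
--         heapify(arr, n, i)
--     for i in range(n - 1, 0, -1):
--         arr[i], arr[0] = arr[0], arr[i]
--         heapify(arr, i, 0)
-- ===== Notes on version B (the rewrite author's own statement) =====
-- stated objective: alternative
-- what changed: The recursive introsort_util driver is replaced by an iterative loop over an explicit stack of (low, high, depth_limit) frames (right subrange pushed before left to preserve the pre-order), and the insertion-sort step finds the key's position first and then relocates it with one del+insert instead of shifting elements while scanning.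
import Mathlib
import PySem

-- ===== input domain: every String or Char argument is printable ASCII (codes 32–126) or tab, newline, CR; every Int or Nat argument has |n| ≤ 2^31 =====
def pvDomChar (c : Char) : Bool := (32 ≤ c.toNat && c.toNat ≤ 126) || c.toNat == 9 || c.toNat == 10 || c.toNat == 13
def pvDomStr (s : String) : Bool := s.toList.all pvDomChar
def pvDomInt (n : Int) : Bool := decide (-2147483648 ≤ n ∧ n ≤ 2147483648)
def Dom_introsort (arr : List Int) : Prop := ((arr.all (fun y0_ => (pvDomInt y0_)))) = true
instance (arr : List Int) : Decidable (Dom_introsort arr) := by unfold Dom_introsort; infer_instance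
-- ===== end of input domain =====

-- B replaces the recursive introsort_util driver by an iterative loop over an explicit
-- stack of (low, high, depth_limit) frames, and relocates each insertion-sort key with
-- one del+insert instead of shifting elements while scanning.  Both versions sort the
-- argument list in place in Python; the equivalence proved here is about the returned
-- comparison count (the ports are pure).

-- ===== PORT A =====
-- arr[i] read / write (indices are in range and nonnegative on every reachable call)
def idxI (xs : List Int) (i : Int) : Int := PySem.List.pyGetD xs i 0
def setI (xs : List Int) (i : Int) (v : Int) : List Int := PySem.List.pySetD xs i v
-- arr[i], arr[j] = arr[j], arr[i]
def swapI (xs : List Int) (i j : Int) : List Int :=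
  let a := idxI xs i
  let b := idxI xs j
  setI (setI xs i b) j a

-- partition(arr, low, high) on state (arr, comparisons); returns (arr, pivot index, comparisons)
def partStep (pivot : Int) (s : List Int × Int × Int) (j : Int) : List Int × Int × Int :=
  let c := s.2.2 + 1
  if idxI s.1 j ≤ pivot then (swapI s.1 (s.2.1 + 1) j, s.2.1 + 1, c)
  else (s.1, s.2.1, c)

def partitionP (xs : List Int) (low high c : Int) : List Int × Int × Int :=
  let pivot := idxI xs high
  let s := (PySem.List.pyRange low high 1).foldl (partStep pivot) (xs, low - 1, c)
  (swapI s.1 (s.2.1 + 1) high, s.2.1 + 1, s.2.2)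

-- the inner `while j >= low and arr[j] > key` shift loop of insertion_sort
def shiftA (low key : Int) (xs : List Int) (j c : Int) : List Int × Int :=
  if h : low ≤ j ∧ key < idxI xs j then
    shiftA low key (setI xs (j + 1) (idxI xs j)) (j - 1) (c + 1)
  else (setI xs (j + 1) key, c)
termination_by (j - low + 1).toNat
decreasing_by omega

-- insertion_sort(arr, low, high) on state (arr, comparisons)
def insStepA (low : Int) (s : List Int × Int) (i : Int) : List Int × Int :=
  shiftA low (idxI s.1 i) s.1 (i - 1) (s.2 + 1)

def insertionA (xs : List Int) (low high c : Int) : List Int × Int :=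
  (PySem.List.pyRange (low + 1) (high + 1) 1).foldl (insStepA low) (xs, c)

-- heapify(arr, n, i); the fuel only guards totality (each real recursion increases i,
-- so xs.length + 1 is never exhausted on a reachable call)
def heapifyP (fuel : Nat) (xs : List Int) (n i : Int) : List Int :=
  match fuel with
  | 0 => xs
  | fuel + 1 =>
    let l := 2 * i + 1
    let r := 2 * i + 2
    let largest := if l < n ∧ idxI xs i < idxI xs l then l else i
    let largest := if r < n ∧ idxI xs largest < idxI xs r then r else largest
    if largest ≠ i then heapifyP fuel (swapI xs i largest) n largest
    else xs

-- heap_sort(arr) (no comparison counting in the Python original)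
def heapSortP (xs : List Int) : List Int :=
  let n : Int := xs.length
  let xs := (PySem.List.pyRange (PySem.Int.floordiv n 2 - 1) (-1) (-1)).foldl
    (fun xs i => heapifyP (xs.length + 1) xs n i) xs
  (PySem.List.pyRange (n - 1) 0 (-1)).foldl
    (fun xs i => heapifyP (xs.length + 1) (swapI xs i 0) i 0) xs

-- introsort_util(arr, low, high, depth_limit) on state (arr, comparisons).
-- The fuel only guards totality: every recursive call strictly shrinks high-low,
-- so the initial fuel arr.length + 1 is never exhausted on a reachable call.
def utilA (fuel : Nat) (low high d : Int) (xs : List Int) (c : Int) : List Int × Int :=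
  match fuel with
  | 0 => (xs, c)
  | fuel + 1 =>
    if high - low + 1 < 16 then insertionA xs low high c
    else if d = 0 then (heapSortP xs, c)
    else
      let s := partitionP xs low high c
      let t := utilA fuel low (s.2.1 - 1) (d - 1) s.1 s.2.2
      utilA fuel (s.2.1 + 1) high (d - 1) t.1 t.2

-- depth_limit = 2*math.log(len(arr)) is a float consulted only through `depth_limit == 0`
-- after integer decrements; 2*log(n) is an exact integer float for no n ≥ 2 on this domain,
-- and for n ≤ 15 the value is never consulted, so it is modeled exactly by the
-- never-zero sentinel -1 (decremented like the float).
def introsort (arr : List Int) : Int :=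
  (utilA (arr.length + 1) 0 ((arr.length : Int) - 1) (-1) arr 0).2

-- ===== PORT B =====
-- the position scan `while j >= low and arr[j] > key: j -= 1` of B's insertion step
def scanB (low key : Int) (xs : List Int) (j c : Int) : Int × Int :=
  if h : low ≤ j ∧ key < idxI xs j then scanB low key xs (j - 1) (c + 1)
  else (j, c)
termination_by (j - low + 1).toNat
decreasing_by omega

-- `del arr[i]; arr.insert(jp, key)` — i is nonnegative and in range on every reachable call
def relocate (xs : List Int) (i jp key : Int) : List Int :=
  PySem.List.insert (xs.eraseIdx i.toNat) jp key

-- B's insertion sort: find the position first, then relocate the key once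
def insStepB (low : Int) (s : List Int × Int) (i : Int) : List Int × Int :=
  let key := idxI s.1 i
  let r := scanB low key s.1 (i - 1) (s.2 + 1)
  (relocate s.1 i (r.1 + 1) key, r.2)

def insertionB (xs : List Int) (low high c : Int) : List Int × Int :=
  (PySem.List.pyRange (low + 1) (high + 1) 1).foldl (insStepB low) (xs, c)

-- B's driver: explicit stack of (fuel, low, high, depth_limit) frames, head = top of stack
-- (Python pushes the right subrange, then the left, so the left is popped first).
-- The per-frame fuel only guards totality, exactly as in utilA.
def loopB (st : List (Nat × Int × Int × Int)) (xs : List Int) (c : Int) : List Int × Int :=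
  match st with
  | [] => (xs, c)
  | (fuel, low, high, d) :: st =>
    match fuel with
    | 0 => loopB st xs c
    | fuel + 1 =>
      if high - low + 1 < 16 then
        let s := insertionB xs low high c
        loopB st s.1 s.2
      else if d = 0 then loopB st (heapSortP xs) c
      else
        let s := partitionP xs low high c
        loopB ((fuel, low, s.2.1 - 1, d - 1) :: (fuel, s.2.1 + 1, high, d - 1) :: st) s.1 s.2.2
termination_by (st.map (fun f => 3 ^ f.1)).sum
decreasing_by
  all_goals simp
  all_goals
    (have h3 : 0 < 3 ^ fuel := pow_pos (by norm_num) fuel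
     have h4 : (3:ℕ) ^ (fuel + 1) = 3 ^ fuel * 3 := pow_succ 3 fuel
     omega)

-- same depth_limit model and totality fuel as in port A
def introsort_alt (arr : List Int) : Int :=
  (loopB [(arr.length + 1, 0, (arr.length : Int) - 1, -1)] arr 0).2

-- ===== PRECONDITION & SPEC =====
-- Pre_ excludes only the empty list, on which A raises ValueError (math.log(0)).
def Pre_introsort (arr : List Int) : Prop := arr ≠ []
instance (arr : List Int) : Decidable (Pre_introsort arr) := by unfold Pre_introsort; infer_instance
def pvWitness_introsort : List Int := [3, 1, 2]

def Spec_introsort (arr : List Int) (out : Int) : Prop := out = introsort_alt arr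
instance (arr : List Int) (out : Int) : Decidable (Spec_introsort arr out) := by unfold Spec_introsort; infer_instance

-- ===== CLAIM (what is proved, stated in full; the proofs are below) =====
def Claim_equal_introsort : Prop := ∀ (arr : List Int), Dom_introsort arr → Pre_introsort arr → Spec_introsort arr (introsort arr)

-- ===== LEMMAS AND PROOFS =====

-- length preservation through port A's primitives
theorem len_setI (xs : List Int) (i v : Int) : (setI xs i v).length = xs.length := by
  simp [setI, PySem.List.length_pySetD]

theorem len_swapI (xs : List Int) (i j : Int) : (swapI xs i j).length = xs.length := by
  simp [swapI, len_setI]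

theorem partFold_inv (pivot : Int) : ∀ (l : List Int) (xs : List Int) (i c : Int),
    (l.foldl (partStep pivot) (xs, i, c)).1.length = xs.length ∧
    i ≤ (l.foldl (partStep pivot) (xs, i, c)).2.1 ∧
    (l.foldl (partStep pivot) (xs, i, c)).2.1 ≤ i + l.length := by
  intro l
  induction l with
  | nil => intro xs i c; simp
  | cons j l ih =>
    intro xs i c
    rw [List.foldl_cons, partStep]
    dsimp only
    split_ifs with hle
    · have h := ih (swapI xs (i + 1) j) (i + 1) (c + 1)
      simp only [len_swapI] at h
      refine ⟨h.1, by omega, ?_⟩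
      simp only [List.length_cons]
      omega
    · have h := ih xs i (c + 1)
      refine ⟨h.1, by omega, ?_⟩
      simp only [List.length_cons]
      omega

theorem partitionP_len (xs : List Int) (low high c : Int) :
    (partitionP xs low high c).1.length = xs.length := by
  have h := partFold_inv (idxI xs high) (PySem.List.pyRange low high 1) xs (low - 1) c
  simp [partitionP, len_swapI, h.1]

theorem partitionP_bounds (xs : List Int) (low high c : Int) (h : low ≤ high) :
    low ≤ (partitionP xs low high c).2.1 ∧ (partitionP xs low high c).2.1 ≤ high := by
  have hb := partFold_inv (idxI xs high) (PySem.List.pyRange low high 1) xs (low - 1) c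
  have hl : (PySem.List.pyRange low high 1).length = (high - low).toNat :=
    PySem.List.length_pyRange_one low high
  have e : (partitionP xs low high c).2.1
      = ((PySem.List.pyRange low high 1).foldl (partStep (idxI xs high)) (xs, low - 1, c)).2.1 + 1 := rfl
  constructor <;> omega

theorem shiftA_len (low key : Int) (xs : List Int) (j c : Int) :
    (shiftA low key xs j c).1.length = xs.length := by
  fun_induction shiftA <;> simp_all [len_setI]

theorem insertionA_len : ∀ (l : List Int) (xs : List Int) (c : Int),
    (l.foldl (insStepA low) (xs, c)).1.length = xs.length := by
  intro l
  induction l with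
  | nil => simp
  | cons i l ih =>
    intro xs c
    rw [List.foldl_cons]
    rw [show insStepA low (xs, c) i = (shiftA low (idxI xs i) xs (i - 1) (c + 1)) from rfl]
    rw [ih]
    exact shiftA_len low (idxI xs i) xs (i - 1) (c + 1)

theorem heapifyP_len : ∀ (fuel : Nat) (xs : List Int) (n i : Int),
    (heapifyP fuel xs n i).length = xs.length := by
  intro fuel
  induction fuel with
  | zero => intro xs n i; rfl
  | succ fuel ih =>
    intro xs n i
    rw [heapifyP]
    split_ifs <;> simp [ih, len_swapI]

theorem foldHeap_len (n : Int) : ∀ (l : List Int) (xs : List Int),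
    ((l.foldl (fun xs i => heapifyP (xs.length + 1) xs n i) xs)).length = xs.length := by
  intro l
  induction l with
  | nil => intro xs; rfl
  | cons i l ih => intro xs; rw [List.foldl_cons, ih, heapifyP_len]

theorem foldHeap2_len : ∀ (l : List Int) (xs : List Int),
    ((l.foldl (fun xs i => heapifyP (xs.length + 1) (swapI xs i 0) i 0) xs)).length = xs.length := by
  intro l
  induction l with
  | nil => intro xs; rfl
  | cons i l ih => intro xs; rw [List.foldl_cons, ih, heapifyP_len, len_swapI]

theorem heapSortP_len (xs : List Int) : (heapSortP xs).length = xs.length := by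
  unfold heapSortP
  rw [foldHeap2_len, foldHeap_len]

theorem utilA_len : ∀ (fuel : Nat) (low high d : Int) (xs : List Int) (c : Int),
    (utilA fuel low high d xs c).1.length = xs.length := by
  intro fuel
  induction fuel with
  | zero => intro low high d xs c; rfl
  | succ fuel ih =>
    intro low high d xs c
    rw [utilA]
    split_ifs with h1 h2
    · exact insertionA_len _ _ _
    · exact heapSortP_len xs
    · rw [ih, ih, partitionP_len]

-- the scan of B reads only positions between low and j
theorem scanB_congr (low key : Int) : ∀ (k : Nat) (j : Int) (xs ys : List Int) (c : Int),
    (j - low + 1).toNat ≤ k →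
    (∀ t : Int, low ≤ t → t ≤ j → idxI ys t = idxI xs t) →
    scanB low key ys j c = scanB low key xs j c := by
  intro k
  induction k with
  | zero =>
    intro j xs ys c hk hag
    conv_lhs => rw [scanB]
    conv_rhs => rw [scanB]
    rw [dif_neg (by omega), dif_neg (by omega)]
  | succ k ih =>
    intro j xs ys c hk hag
    conv_lhs => rw [scanB]
    conv_rhs => rw [scanB]
    by_cases hc : low ≤ j ∧ key < idxI xs j
    · have hy : low ≤ j ∧ key < idxI ys j := by
        refine ⟨hc.1, ?_⟩
        rw [hag j hc.1 le_rfl]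
        exact hc.2
      rw [dif_pos hy, dif_pos hc]
      exact ih (j - 1) xs ys (c + 1) (by omega) (fun t h1 h2 => hag t h1 (by omega))
    · have hy : ¬(low ≤ j ∧ key < idxI ys j) := by
        intro hy
        exact hc ⟨hy.1, by rw [← hag j hy.1 le_rfl]; exact hy.2⟩
      rw [dif_neg hy, dif_neg hc]

theorem scanB_bounds (low key : Int) : ∀ (k : Nat) (j : Int) (xs : List Int) (c : Int),
    (j - low + 1).toNat ≤ k → low - 1 ≤ j →
    low - 1 ≤ (scanB low key xs j c).1 ∧ (scanB low key xs j c).1 ≤ j := by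
  intro k
  induction k with
  | zero =>
    intro j xs c hk hj
    rw [scanB, dif_neg (by omega)]
    exact ⟨hj, le_rfl⟩
  | succ k ih =>
    intro j xs c hk hj
    rw [scanB]
    by_cases hc : low ≤ j ∧ key < idxI xs j
    · rw [dif_pos hc]
      have := ih (j - 1) xs (c + 1) (by omega) (by omega)
      exact ⟨this.1, by omega⟩
    · rw [dif_neg hc]
      exact ⟨hj, le_rfl⟩

-- the written-back array both insertion variants produce: key at j'+1, the old
-- segment j'+1..j shifted one place right, the rest untouched
def wb (xs : List Int) (j' j key : Int) : List Int :=
  xs.take (j' + 1).toNat ++ key :: ((xs.take (j + 1).toNat).drop (j' + 1).toNat) ++ xs.drop (j + 2).toNat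

theorem wb_self (xs : List Int) (j key : Int) (h0 : 0 ≤ j + 1) (hlen : j + 1 < (xs.length : Int)) :
    wb xs j j key = setI xs (j + 1) key := by
  unfold wb setI
  rw [PySem.List.pySetD_of_nonneg _ _ h0]
  rw [List.set_eq_take_append_cons_drop, if_pos (by omega)]
  rw [List.drop_eq_nil_of_le (by simp)]
  have : (j + 2).toNat = (j + 1).toNat + 1 := by omega
  rw [this]
  simp

theorem wb_step (low : Int) (xs : List Int) (j key j' : Int) (h0 : 0 ≤ low)
    (hb1 : low - 1 ≤ j') (hb2 : j' ≤ j - 1) (hlen : j + 1 < (xs.length : Int)) :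
    wb (setI xs (j + 1) (idxI xs j)) j' (j - 1) key = wb xs j' j key := by
  have hj : 0 ≤ j := by omega
  have hjl : j.toNat < xs.length := by omega
  have hp : (j + 1).toNat < xs.length := by omega
  have hv : idxI xs j = xs[j.toNat] := by
    unfold idxI
    rw [PySem.List.pyGetD_eq_getElem _ _ hj (by omega)]
  unfold wb setI
  rw [PySem.List.pySetD_of_nonneg _ _ (by omega)]
  have e1 : ((j - 1) + 1).toNat = j.toNat := by omega
  have e2 : ((j - 1) + 2).toNat = (j + 1).toNat := by omega
  rw [e1, e2]
  rw [List.take_set_of_le (by omega), List.take_set_of_le (by omega)]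
  have e3 : (xs.set (j + 1).toNat (idxI xs j)).drop (j + 1).toNat
      = idxI xs j :: xs.drop (j + 2).toNat := by
    rw [List.drop_eq_getElem_cons (by simp [hp])]
    rw [List.getElem_set_self]
    rw [List.drop_set_of_lt (by omega)]
    have : (j + 1).toNat + 1 = (j + 2).toNat := by omega
    rw [this]
  rw [e3]
  have e4 : xs.take (j + 1).toNat = xs.take j.toNat ++ [xs[j.toNat]] := by
    have : (j + 1).toNat = j.toNat + 1 := by omega
    rw [this, List.take_add_one, List.getElem?_eq_getElem hjl]
    rfl
  rw [e4, List.drop_append_of_le_length (by simp; omega)]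
  simp [hv]

theorem shiftA_wb (low key : Int) : ∀ (k : Nat) (xs : List Int) (j c : Int),
    (j - low + 1).toNat ≤ k → 0 ≤ low → low - 1 ≤ j → j + 1 < (xs.length : Int) →
    shiftA low key xs j c
      = (wb xs (scanB low key xs j c).1 j key, (scanB low key xs j c).2) := by
  intro k
  induction k with
  | zero =>
    intro xs j c hk h0 hj hlen
    rw [shiftA, dif_neg (by omega)]
    conv_rhs => rw [scanB]
    rw [dif_neg (by omega)]
    refine Prod.ext ?_ rfl
    rw [wb_self xs j key (by omega) hlen]
  | succ k ih =>
    intro xs j c hk h0 hj hlen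
    rw [shiftA]
    by_cases hc : low ≤ j ∧ key < idxI xs j
    · rw [dif_pos hc]
      conv_rhs => rw [scanB]
      rw [dif_pos hc]
      set xs2 := setI xs (j + 1) (idxI xs j) with hxs2
      have hlen2 : xs2.length = xs.length := len_setI xs (j + 1) (idxI xs j)
      have hag : ∀ t : Int, low ≤ t → t ≤ j - 1 → idxI xs2 t = idxI xs t := by
        intro t h1 h2
        simp only [hxs2, idxI, setI]
        rw [PySem.List.pySetD_of_nonneg _ _ (by omega)]
        rw [PySem.List.pyGetD_eq_getElem (i := t) _ _ (by omega) (by rw [List.length_set]; omega),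
            PySem.List.pyGetD_eq_getElem (i := t) _ _ (by omega) (by omega)]
        rw [List.getElem_set]
        rw [if_neg (by omega)]
      have hscan : scanB low key xs2 (j - 1) (c + 1) = scanB low key xs (j - 1) (c + 1) :=
        scanB_congr low key ((j - 1) - low + 1).toNat (j - 1) xs xs2 (c + 1) le_rfl hag
      rw [ih xs2 (j - 1) (c + 1) (by omega) h0 (by omega) (by omega), hscan]
      refine Prod.ext ?_ rfl
      have hb := scanB_bounds low key ((j - 1) - low + 1).toNat (j - 1) xs (c + 1) le_rfl (by omega)
      exact wb_step low xs j key (scanB low key xs (j - 1) (c + 1)).1 h0 hb.1 hb.2 hlen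
    · rw [dif_neg hc]
      conv_rhs => rw [scanB]
      rw [dif_neg hc]
      refine Prod.ext ?_ rfl
      rw [wb_self xs j key (by omega) hlen]

theorem pyInsert_eq (xs : List Int) (p : Int) (v : Int) (h0 : 0 ≤ p) (h1 : p ≤ (xs.length : Int)) :
    PySem.List.insert xs p v = xs.take p.toNat ++ v :: xs.drop p.toNat := by
  simp only [PySem.List.insert, PySem.List.sliceIndices]
  norm_num
  rw [if_neg (by omega), min_eq_left (by omega)]

theorem relocate_wb (xs : List Int) (i j' key : Int)
    (h2 : j' ≤ i - 1) (h3 : low - 1 ≤ j') (h0 : 0 ≤ low) (h4 : i < (xs.length : Int)) (h5 : 1 ≤ i) :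
    relocate xs i (j' + 1) key = wb xs j' (i - 1) key := by
  have hi : i.toNat < xs.length := by omega
  have hel : (xs.eraseIdx i.toNat).length = xs.length - 1 := List.length_eraseIdx_of_lt hi
  unfold relocate
  rw [pyInsert_eq _ _ _ (by omega) (by rw [hel]; omega)]
  rw [List.eraseIdx_eq_take_drop_succ]
  have htl : (j' + 1).toNat ≤ (List.take i.toNat xs).length := by
    rw [List.length_take]; omega
  rw [List.take_append_of_le_length htl, List.drop_append_of_le_length htl]
  rw [List.take_take, min_eq_left (by omega)]
  unfold wb
  have e1 : ((i - 1) + 1).toNat = i.toNat := by omega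
  have e2 : ((i - 1) + 2).toNat = i.toNat + 1 := by omega
  rw [e1, e2]
  simp

theorem insFold_eq (low : Int) (h0 : 0 ≤ low) : ∀ (l : List Int) (xs : List Int) (c : Int),
    (∀ i ∈ l, low + 1 ≤ i ∧ i < (xs.length : Int)) →
    l.foldl (insStepB low) (xs, c) = l.foldl (insStepA low) (xs, c) := by
  intro l
  induction l with
  | nil => intro xs c _; rfl
  | cons i l ih =>
    intro xs c hmem
    have hi := hmem i (List.mem_cons_self)
    have hstep : insStepB low (xs, c) i = insStepA low (xs, c) i := by
      unfold insStepB insStepA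
      dsimp only
      have hb := scanB_bounds low (idxI xs i) ((i - 1) - low + 1).toNat (i - 1) xs (c + 1)
        le_rfl (by omega)
      rw [shiftA_wb low (idxI xs i) ((i - 1) - low + 1).toNat xs (i - 1) (c + 1)
        le_rfl h0 (by omega) (by omega)]
      rw [relocate_wb (low := low) xs i (scanB low (idxI xs i) xs (i - 1) (c + 1)).1 (idxI xs i)
        hb.2 hb.1 h0 (by omega) (by omega)]
    rw [List.foldl_cons, List.foldl_cons, hstep]
    apply ih
    intro t ht
    have := hmem t (List.mem_cons_of_mem _ ht)
    have hlen : (shiftA low (idxI (xs, c).1 i) (xs, c).1 (i - 1) ((xs, c).2 + 1)).1.length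
        = xs.length := shiftA_len _ _ _ _ _
    omega

theorem insertionB_eq (xs : List Int) (low high c : Int) (h0 : 0 ≤ low)
    (hh : high < (xs.length : Int)) :
    insertionB xs low high c = insertionA xs low high c := by
  unfold insertionB insertionA
  apply insFold_eq low h0
  intro i hi
  rw [PySem.List.mem_pyRange_one] at hi
  omega

theorem sim_loopB (fuel : Nat) (low high d : Int) (xs : List Int) (c : Int)
    (st : List (Nat × Int × Int × Int)) (h0 : 0 ≤ low) (hh : high < (xs.length : Int)) :
    loopB ((fuel, low, high, d) :: st) xs c
      = loopB st (utilA fuel low high d xs c).1 (utilA fuel low high d xs c).2 := by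
  induction fuel generalizing low high d xs c st with
  | zero => rw [loopB]; rfl
  | succ fuel ih =>
    rw [loopB, utilA]
    split_ifs with h1 h2
    · rw [insertionB_eq xs low high c h0 hh]
    · rfl
    · have hlh : low ≤ high := by omega
      have hb := partitionP_bounds xs low high c hlh
      have hl := partitionP_len xs low high c
      rw [ih low ((partitionP xs low high c).2.1 - 1) (d - 1) (partitionP xs low high c).1
        (partitionP xs low high c).2.2 _ h0 (by omega)]
      rw [ih ((partitionP xs low high c).2.1 + 1) high (d - 1) _ _ _ (by omega)
        (by rw [utilA_len, hl]; exact hh)]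

-- ===== VERDICT (by name: the statement is the Claim_ definition above) =====
theorem introsort_spec : Claim_equal_introsort := by
  intro arr _ _
  unfold Spec_introsort introsort introsort_alt
  rw [sim_loopB _ _ _ _ _ _ _ le_rfl (by omega), loopB]
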